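-- pv_equiv track=rewrite | github.com/wkabbani/advent-of-code | day-06/main.py | get_counts_2
-- ===== SOURCE A (Python) =====
-- from functools import reduce
-- from collections import Counter
--
-- def get_counts_2(data):
--     counts = []
--     groups = data.split("\n\n")
--     for group in groups:
--         count = 0
--         persons = group.split('\n')
--         counters = [Counter(person) for person in persons]
--         res = reduce(lambda x, y: x & y, counters)
--         counts.append(len(res))
--     return sum(counts)
-- ===== SOURCE B (Python) =====
-- def get_counts_2(data):
--     total = 0
--     for group in data.split("\n\n"):
--         persons = group.split('\n')
--         votes = {}
--         for person in persons:
--             for c in set(person):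
--                 votes[c] = votes.get(c, 0) + 1
--         total += sum(1 for v in votes.values() if v == len(persons))
--     return total
-- ===== Notes on version B (the rewrite author's own statement) =====
-- stated objective: alternative
-- what changed: Replaces per-person Counters and a reduce of pairwise Counter intersections by a single vote-counting pass (votes[c] = number of persons containing c) followed by a threshold filter votes[c] == len(persons).
import Mathlib
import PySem

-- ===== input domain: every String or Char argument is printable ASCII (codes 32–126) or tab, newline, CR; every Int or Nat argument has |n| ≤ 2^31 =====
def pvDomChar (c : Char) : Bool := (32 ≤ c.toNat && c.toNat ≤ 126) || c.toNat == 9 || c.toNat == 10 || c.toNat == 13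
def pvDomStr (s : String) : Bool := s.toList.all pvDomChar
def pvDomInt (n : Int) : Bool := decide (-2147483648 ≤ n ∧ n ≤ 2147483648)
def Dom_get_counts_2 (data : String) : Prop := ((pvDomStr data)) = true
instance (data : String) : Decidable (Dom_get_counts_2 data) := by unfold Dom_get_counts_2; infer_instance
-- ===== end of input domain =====

-- B replaces the reduce of pairwise Counter intersections by one vote-counting pass plus a
-- threshold filter (alternative decomposition, same asymptotic cost).

-- ===== PORT A =====
-- Counter.__and__: iterate self.items(), keep min(count, other[elem]) when positive.
def counterAnd (x y : PySem.Dict Char Int) : PySem.Dict Char Int :=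
  x.items.foldl (fun r kv =>
    let n := min kv.2 (y.getD kv.1 0)
    if 0 < n then r.insert kv.1 n else r) PySem.Dict.empty

def get_counts_2 (data : String) : Int :=
  let groups := (PySem.Str.split? data "\n\n").getD []   -- separator is a nonempty literal: split? is always `some`
  let counts := groups.foldl (fun counts group =>
    let persons := (PySem.Str.split? group "\n").getD []
    let counters := persons.map (fun person => PySem.Dict.counter person.toList)
    -- functools.reduce over a list that split always makes nonempty (guard value for [] is unreachable)
    let res := match counters with
      | [] => PySem.Dict.empty
      | c :: cs => cs.foldl counterAnd c
    counts ++ [(res.size : Int)]) []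
  counts.foldl (· + ·) 0

-- ===== PORT B =====
def get_counts_2_alt (data : String) : Int :=
  ((PySem.Str.split? data "\n\n").getD []).foldl (fun total group =>
    let persons := (PySem.Str.split? group "\n").getD []
    let votes := persons.foldl (fun d person =>
      (PySem.Set.ofList person.toList).foldl (fun d c => d.modify c 0 (· + 1)) d)
      PySem.Dict.empty
    total + votes.values.foldl (fun acc v => if v = (persons.length : Int) then acc + 1 else acc) 0) 0

-- ===== PRECONDITION & SPEC =====
def Spec_get_counts_2 (data : String) (out : Int) : Prop := out = get_counts_2_alt data
instance (data : String) (out : Int) : Decidable (Spec_get_counts_2 data out) := by unfold Spec_get_counts_2; infer_instance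

-- ===== CLAIM (what is proved, stated in full; the proofs are below) =====
def Claim_equal_get_counts_2 : Prop := ∀ (data : String), Dom_get_counts_2 data → Spec_get_counts_2 data (get_counts_2 data)

-- ===== LEMMAS AND PROOFS =====

-- the per-group value computed by A
def fA (group : String) : Int :=
  let persons := (PySem.Str.split? group "\n").getD []
  let counters := persons.map (fun person => PySem.Dict.counter person.toList)
  let res := match counters with
    | [] => PySem.Dict.empty
    | c :: cs => cs.foldl counterAnd c
  (res.size : Int)

-- the per-group value computed by B
def fB (group : String) : Int :=
  let persons := (PySem.Str.split? group "\n").getD []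
  let votes := persons.foldl (fun d person =>
    (PySem.Set.ofList person.toList).foldl (fun d c => d.modify c 0 (· + 1)) d)
    PySem.Dict.empty
  votes.values.foldl (fun acc v => if v = (persons.length : Int) then acc + 1 else acc) 0

-- good counter dicts: unique keys, positive counts
def GoodC (d : PySem.Dict Char Int) : Prop :=
  d.keys.Nodup ∧ ∀ k ∈ d.keys, 0 < d.getD k 0

lemma items_counterAnd_aux (y : PySem.Dict Char Int) :
    ∀ (l : List (Char × Int)) (d : PySem.Dict Char Int),
      (d.keys ++ l.map Prod.fst).Nodup →
      (l.foldl (fun r kv =>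
          let n := min kv.2 (y.getD kv.1 0)
          if 0 < n then r.insert kv.1 n else r) d).items
        = d.items ++ (l.filter (fun kv => decide (0 < min kv.2 (y.getD kv.1 0)))).map
            (fun kv => (kv.1, min kv.2 (y.getD kv.1 0))) := by
  intro l
  induction l with
  | nil => intro d _; simp
  | cons kv tl ih =>
    intro d h
    rw [List.map_cons, List.append_cons] at h
    have hsplit := List.nodup_append.mp h
    have hnotmem : kv.1 ∉ d.keys := by
      have h2 := List.nodup_append.mp hsplit.1
      intro hm
      exact (h2.2.2 kv.1 hm kv.1 (by simp)) rfl
    have hcont : d.contains kv.1 = false := by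
      rw [PySem.Dict.contains_eq_decide_mem_keys]
      simp [hnotmem]
    simp only [List.foldl_cons, List.filter_cons]
    by_cases hpos : 0 < min kv.2 (y.getD kv.1 0)
    · rw [if_pos hpos]
      rw [ih (d.insert kv.1 (min kv.2 (y.getD kv.1 0))) (by
        rw [PySem.Dict.keys_insert_of_not_contains d _ hcont]; exact h)]
      rw [PySem.Dict.items_insert_of_not_contains d _ hcont]
      simp [hpos]
    · rw [if_neg hpos]
      rw [ih d (by
        refine List.Nodup.sublist ?_ (by simpa [List.append_assoc] using h)
        exact List.Sublist.append_left (List.sublist_cons_self kv.1 (tl.map Prod.fst)) d.keys)]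
      simp [hpos]

lemma counterAnd_items (x y : PySem.Dict Char Int) (hx : GoodC x) :
    (counterAnd x y).items
      = (x.keys.filter (fun k => decide (0 < min (x.getD k 0) (y.getD k 0)))).map
          (fun k => (k, min (x.getD k 0) (y.getD k 0))) := by
  unfold counterAnd
  rw [items_counterAnd_aux y x.items PySem.Dict.empty (by
    have he : (PySem.Dict.empty : PySem.Dict Char Int).keys = [] := rfl
    rw [he, List.nil_append]
    exact hx.1)]
  rw [show (PySem.Dict.empty : PySem.Dict Char Int).items = [] from rfl, List.nil_append]
  rw [PySem.Dict.items_eq_map_keys x hx.1 0, List.filter_map]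
  simp [List.map_map, Function.comp_def]

lemma counterAnd_spec (x y : PySem.Dict Char Int) (hx : GoodC x) :
    GoodC (counterAnd x y) ∧
      (counterAnd x y).keys = x.keys.filter (fun k => decide (0 < y.getD k 0)) := by
  have hit := counterAnd_items x y hx
  have hkeys : (counterAnd x y).keys
      = x.keys.filter (fun k => decide (0 < min (x.getD k 0) (y.getD k 0))) := by
    show (counterAnd x y).items.map Prod.fst = _
    rw [hit]; simp [List.map_map, Function.comp_def]
  have hkeys2 : (counterAnd x y).keys = x.keys.filter (fun k => decide (0 < y.getD k 0)) := by
    rw [hkeys]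
    apply List.filter_congr
    intro k hk
    have hp := hx.2 k hk
    simp [hp]
  have hnd : (counterAnd x y).keys.Nodup := by
    rw [hkeys2]; exact hx.1.filter _
  refine ⟨⟨hnd, ?_⟩, hkeys2⟩
  intro k hk
  rw [hkeys] at hk
  rcases List.mem_filter.mp hk with ⟨hkx, hcond⟩
  have hposmin : 0 < min (x.getD k 0) (y.getD k 0) := of_decide_eq_true hcond
  have hmem : (k, min (x.getD k 0) (y.getD k 0)) ∈ (counterAnd x y).items := by
    rw [hit]
    exact List.mem_map.mpr ⟨k, List.mem_filter.mpr ⟨hkx, hcond⟩, rfl⟩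
  rw [PySem.Dict.getD_of_mem_items _ hmem hnd 0]
  exact hposmin

lemma goodC_counter (xs : List Char) : GoodC (PySem.Dict.counter xs) := by
  refine ⟨PySem.Dict.nodup_keys_counter xs, ?_⟩
  intro k hk
  rw [PySem.Dict.getD_counter]
  rw [PySem.Dict.keys_counter] at hk
  have hm := (PySem.Set.mem_ofList xs k).mp hk
  exact_mod_cast List.count_pos_iff.mpr hm

lemma foldAnd_keys (ps : List String) :
    ∀ (d : PySem.Dict Char Int), GoodC d →
      GoodC (ps.foldl (fun d p => counterAnd d (PySem.Dict.counter p.toList)) d) ∧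
      (ps.foldl (fun d p => counterAnd d (PySem.Dict.counter p.toList)) d).keys
        = d.keys.filter (fun k => ps.all (fun p => decide (k ∈ p.toList))) := by
  induction ps with
  | nil => intro d hd; exact ⟨hd, by simp⟩
  | cons p ps ih =>
    intro d hd
    simp only [List.foldl_cons]
    obtain ⟨hgood, hkeys⟩ := counterAnd_spec d (PySem.Dict.counter p.toList) hd
    obtain ⟨hg2, hk2⟩ := ih _ hgood
    refine ⟨hg2, ?_⟩
    rw [hk2, hkeys, List.filter_filter]
    apply List.filter_congr
    intro k _
    simp only [PySem.Dict.getD_counter, List.all_cons]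
    have hdec : (decide (0 < (List.count k p.toList : Int))) = decide (k ∈ p.toList) := by
      simp [List.count_pos_iff]
    rw [hdec, Bool.and_comm]

lemma votes_getD (ps : List String) :
    ∀ (d : PySem.Dict Char Int) (c : Char),
      (ps.foldl (fun d person =>
          (PySem.Set.ofList person.toList).foldl (fun d c => d.modify c 0 (· + 1)) d) d).getD c 0
        = d.getD c 0 + (ps.countP (fun p => decide (c ∈ p.toList)) : Int) := by
  induction ps with
  | nil => intro d c; simp
  | cons p ps ih =>
    intro d c
    simp only [List.foldl_cons]
    rw [ih, PySem.Dict.getD_foldl_modify_add_one]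
    have hcnt : List.count c (PySem.Set.ofList p.toList)
        = if c ∈ p.toList then 1 else 0 := by
      by_cases hm : c ∈ p.toList
      · rw [if_pos hm]
        exact List.count_eq_one_of_mem (PySem.Set.nodup_ofList _) ((PySem.Set.mem_ofList _ _).mpr hm)
      · rw [if_neg hm]
        exact List.count_eq_zero_of_not_mem (fun h => hm ((PySem.Set.mem_ofList _ _).mp h))
    rw [hcnt, List.countP_cons]
    by_cases hm : c ∈ p.toList
    · simp only [hm, if_true, decide_true]
      push_cast
      ring
    · simp [hm]

lemma votes_keys (ps : List String) :
    ∀ (d : PySem.Dict Char Int), d.keys.Nodup →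
      (ps.foldl (fun d person =>
          (PySem.Set.ofList person.toList).foldl (fun d c => d.modify c 0 (· + 1)) d) d).keys.Nodup ∧
      ∀ c, c ∈ (ps.foldl (fun d person =>
          (PySem.Set.ofList person.toList).foldl (fun d c => d.modify c 0 (· + 1)) d) d).keys
        ↔ c ∈ d.keys ∨ ∃ p ∈ ps, c ∈ p.toList := by
  induction ps with
  | nil => intro d hd; exact ⟨hd, fun c => by simp⟩
  | cons p ps ih =>
    intro d hd
    simp only [List.foldl_cons]
    have hinner : ((PySem.Set.ofList p.toList).foldl (fun d c => d.modify c 0 (· + 1)) d).keys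
        = PySem.Set.update d.keys (PySem.Set.ofList p.toList) :=
      PySem.Dict.keys_foldl_modify _ _ _ _
    have hnd2 : ((PySem.Set.ofList p.toList).foldl (fun d c => d.modify c 0 (· + 1)) d).keys.Nodup := by
      rw [hinner]; exact PySem.Set.nodup_update _ _ hd
    obtain ⟨h1, h2⟩ := ih _ hnd2
    refine ⟨h1, ?_⟩
    intro c
    rw [h2 c, hinner, PySem.Set.mem_update]
    simp only [PySem.Set.mem_ofList, List.mem_cons]
    constructor
    · rintro (⟨h | h⟩ | ⟨q, hq, hc⟩)
      · exact Or.inl h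
      · exact Or.inr ⟨p, Or.inl rfl, h⟩
      · exact Or.inr ⟨q, Or.inr hq, hc⟩
    · rintro (h | ⟨q, (rfl | hq), hc⟩)
      · exact Or.inl (Or.inl h)
      · exact Or.inl (Or.inr hc)
      · exact Or.inr ⟨q, hq, hc⟩

lemma foldl_ifcount (n : Int) (l : List Int) :
    ∀ (a : Int), l.foldl (fun acc v => if v = n then acc + 1 else acc) a
      = a + (l.countP (fun v => decide (v = n)) : Int) := by
  induction l with
  | nil => intro a; simp
  | cons x l ih =>
    intro a
    simp only [List.foldl_cons, List.countP_cons]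
    by_cases hx : x = n
    · rw [if_pos hx, ih]
      simp only [hx, decide_true]
      push_cast
      ring
    · rw [if_neg hx, ih]
      simp [hx]

lemma group_eq (persons : List String) :
    ((match persons.map (fun (person : String) => PySem.Dict.counter person.toList) with
      | [] => PySem.Dict.empty
      | c :: cs => cs.foldl counterAnd c).size : Int)
    = (persons.foldl (fun d person =>
          (PySem.Set.ofList person.toList).foldl (fun d c => d.modify c 0 (· + 1)) d)
        PySem.Dict.empty).values.foldl
        (fun acc v => if v = (persons.length : Int) then acc + 1 else acc) 0 := by
  cases persons with
  | nil => rfl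
  | cons p0 rest =>
    simp only [List.map_cons]
    rw [List.foldl_map]
    obtain ⟨⟨hndA, _⟩, hkeysA⟩ := foldAnd_keys rest (PySem.Dict.counter p0.toList) (goodC_counter _)
    have hsizeA : (rest.foldl (fun d p => counterAnd d (PySem.Dict.counter p.toList))
        (PySem.Dict.counter p0.toList)).size
        = ((PySem.Set.ofList p0.toList).filter
            (fun k => rest.all (fun p => decide (k ∈ p.toList)))).length := by
      have h1 : (rest.foldl (fun d p => counterAnd d (PySem.Dict.counter p.toList))
          (PySem.Dict.counter p0.toList)).size
          = (rest.foldl (fun d p => counterAnd d (PySem.Dict.counter p.toList))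
              (PySem.Dict.counter p0.toList)).keys.length := by
        show (rest.foldl (fun d p => counterAnd d (PySem.Dict.counter p.toList))
            (PySem.Dict.counter p0.toList)).items.length = _
        show _ = ((rest.foldl (fun d p => counterAnd d (PySem.Dict.counter p.toList))
            (PySem.Dict.counter p0.toList)).items.map Prod.fst).length
        rw [List.length_map]
      rw [h1, hkeysA, PySem.Dict.keys_counter]
    set votes : PySem.Dict Char Int := (p0 :: rest).foldl (fun d person =>
        (PySem.Set.ofList person.toList).foldl (fun d c => d.modify c 0 (· + 1)) d)
      PySem.Dict.empty with hvotes
    obtain ⟨hndB, hmemB⟩ := votes_keys (p0 :: rest) PySem.Dict.empty (by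
      show ([] : List Char).Nodup
      exact List.nodup_nil)
    rw [← hvotes] at hndB hmemB
    rw [foldl_ifcount, PySem.Dict.values_eq_map_keys votes hndB 0, List.countP_map]
    have hcnt : votes.keys.countP
          ((fun v => decide (v = (((p0 :: rest).length : Nat) : Int))) ∘ fun k => votes.getD k 0)
        = votes.keys.countP (fun c => (p0 :: rest).all (fun p => decide (c ∈ p.toList))) := by
      apply List.countP_congr
      intro c _
      simp only [Function.comp_apply, decide_eq_true_eq, List.all_eq_true]
      rw [hvotes, votes_getD]
      have h0 : (PySem.Dict.empty : PySem.Dict Char Int).getD c 0 = 0 := rfl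
      rw [h0, zero_add, Nat.cast_inj]
      rw [List.countP_eq_length]
      simp
    have hlen : ((PySem.Set.ofList p0.toList).filter
          (fun k => rest.all (fun p => decide (k ∈ p.toList)))).length
        = (votes.keys.filter (fun c => (p0 :: rest).all (fun p => decide (c ∈ p.toList)))).length := by
      apply List.Perm.length_eq
      rw [List.perm_ext_iff_of_nodup ((PySem.Set.nodup_ofList _).filter _) (hndB.filter _)]
      intro a
      have hek : (PySem.Dict.empty : PySem.Dict Char Int).keys = [] := rfl
      simp only [List.mem_filter, PySem.Set.mem_ofList, hmemB a, hek, List.not_mem_nil,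
        false_or, List.all_cons, Bool.and_eq_true, decide_eq_true_eq, List.mem_cons]
      constructor
      · rintro ⟨ha0, hrest⟩
        exact ⟨⟨p0, Or.inl rfl, ha0⟩, ha0, hrest⟩
      · rintro ⟨_, ha0, hrest⟩
        exact ⟨ha0, hrest⟩
    rw [hsizeA, hcnt, List.countP_eq_length_filter, hlen, zero_add]

lemma fA_eq_fB : fA = fB := by
  funext g
  exact group_eq ((PySem.Str.split? g "\n").getD [])

lemma build_counts (f : String → Int) (l : List String) :
    ∀ (acc : List Int), l.foldl (fun cs g => cs ++ [f g]) acc = acc ++ l.map f := by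
  induction l with
  | nil => intro acc; simp
  | cons g l ih =>
    intro acc
    simp only [List.foldl_cons, List.map_cons]
    rw [ih]
    simp

lemma sum_counts (f : String → Int) (l : List String) :
    (l.foldl (fun cs g => cs ++ [f g]) []).foldl (· + ·) 0
      = l.foldl (fun t g => t + f g) 0 := by
  rw [build_counts, List.nil_append, PySem.List.foldl_add l f 0]
  have : ∀ (xs : List Int) (a : Int), xs.foldl (· + ·) a = a + xs.sum := by
    intro xs
    induction xs with
    | nil => intro a; simp
    | cons x xs ih => intro a; simp only [List.foldl_cons, List.sum_cons]; rw [ih]; ring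
  rw [this]

-- ===== VERDICT (by name: the statement is the Claim_ definition above) =====
theorem get_counts_2_spec : Claim_equal_get_counts_2 := by
  intro data _
  unfold Spec_get_counts_2
  have hA : get_counts_2 data
      = (((PySem.Str.split? data "\n\n").getD []).foldl (fun cs g => cs ++ [fA g]) []).foldl (· + ·) 0 := rfl
  have hB : get_counts_2_alt data
      = ((PySem.Str.split? data "\n\n").getD []).foldl (fun t g => t + fB g) 0 := rfl
  rw [hA, hB, sum_counts fA]
  rw [fA_eq_fB]
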